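-- pv_equiv track=rewrite | github.com/Paladin1412/zhiqing-v1 | modules/aimodels/subtitle.py | dict_to_str_and_map
-- ===== SOURCE A (Python) =====
-- def dict_to_str_and_map(pdf_dict):
--     full_str = ''
--     charId_to_pageId = []
--     for page_id in pdf_dict:
--         content_list = pdf_dict[page_id]
--         charId_to_pageId.append([len(full_str), page_id + 1])
--         page_str = ''.join(content_list)
--         full_str += page_str
--
--     charId_to_pageId.append([len(full_str) + 1, len(pdf_dict) + 1])
--
--     return full_str, charId_to_pageId
-- ===== SOURCE B (Python) =====
-- def dict_to_str_and_map(pdf_dict):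
--     # One pass to join each page; offsets as prefix sums; map built by zipping.
--     strs = [''.join(v) for v in pdf_dict.values()]
--     offsets = [0]
--     for s in strs:
--         offsets.append(offsets[-1] + len(s))
--     charId_to_pageId = [[o, k + 1] for o, k in zip(offsets, pdf_dict)]
--     charId_to_pageId.append([offsets[-1] + 1, len(pdf_dict) + 1])
--     return ''.join(strs), charId_to_pageId
-- ===== Notes on version B (the rewrite author's own statement) =====
-- stated objective: alternative
-- what changed: A builds the string and the offset map together in one accumulating loop over the dict; B first joins each page to a list of page strings, computes the offsets as prefix sums in a separate pass, zips them with the keys, and joins the full string once at the end.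
import Mathlib
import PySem

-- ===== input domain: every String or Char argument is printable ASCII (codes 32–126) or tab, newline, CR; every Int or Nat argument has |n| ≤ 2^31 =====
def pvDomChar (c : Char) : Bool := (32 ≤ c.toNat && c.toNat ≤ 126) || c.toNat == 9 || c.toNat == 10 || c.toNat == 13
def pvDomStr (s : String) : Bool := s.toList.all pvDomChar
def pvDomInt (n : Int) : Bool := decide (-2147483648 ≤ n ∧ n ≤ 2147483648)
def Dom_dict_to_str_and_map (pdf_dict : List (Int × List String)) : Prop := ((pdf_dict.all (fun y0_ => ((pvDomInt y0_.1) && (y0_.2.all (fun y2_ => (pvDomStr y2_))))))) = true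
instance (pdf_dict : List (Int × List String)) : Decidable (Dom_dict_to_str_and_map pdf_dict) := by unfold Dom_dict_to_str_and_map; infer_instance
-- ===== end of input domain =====

-- B replaces A's single accumulating loop by map + prefix-sum + zip (same cost, different decomposition); return value only.

-- ===== PORT A =====
def dict_to_str_and_map (pdf_dict : List (Int × List String)) : String × List (List Int) :=
  let d := PySem.Dict.mk pdf_dict
  let r := d.keys.foldl
    (fun (st : String × List (List Int)) page_id =>
      let content_list := d.getD page_id []
      let m := st.2 ++ [[PySem.Str.len st.1, page_id + 1]]
      let page_str := PySem.Str.join "" content_list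
      (st.1 ++ page_str, m))
    ("", [])
  (r.1, r.2 ++ [[PySem.Str.len r.1 + 1, (d.size : Int) + 1]])

-- ===== PORT B =====
def dict_to_str_and_map_alt (pdf_dict : List (Int × List String)) : String × List (List Int) :=
  let strs := pdf_dict.map (fun p => PySem.Str.join "" p.2)
  -- offsets[-1] is PySem.List.pyGet? … (-1); the list starts at [0] and only grows, so the lookup never fails
  let offsets := strs.foldl
    (fun (acc : List Int) s => acc ++ [(PySem.List.pyGet? acc (-1)).getD 0 + PySem.Str.len s]) [0]
  let charmap := (offsets.zip (pdf_dict.map Prod.fst)).map (fun p => [p.1, p.2 + 1]) ++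
    [[(PySem.List.pyGet? offsets (-1)).getD 0 + 1, (pdf_dict.length : Int) + 1]]
  (PySem.Str.join "" strs, charmap)

-- ===== PRECONDITION & SPEC =====
-- The assoc list stands for a Python dict, whose keys are necessarily distinct; a list with
-- duplicate keys is not the image of any dict, so Pre_ requires key distinctness.
def Pre_dict_to_str_and_map (pdf_dict : List (Int × List String)) : Prop :=
  (pdf_dict.map Prod.fst).Nodup
instance (pdf_dict : List (Int × List String)) : Decidable (Pre_dict_to_str_and_map pdf_dict) := by
  unfold Pre_dict_to_str_and_map; infer_instance
def pvWitness_dict_to_str_and_map : (List (Int × List String)) := [(2, ["ab", "c"]), (0, ["x"])]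

def Spec_dict_to_str_and_map (pdf_dict : List (Int × List String)) (out : String × List (List Int)) : Prop := out = dict_to_str_and_map_alt pdf_dict
instance (pdf_dict : List (Int × List String)) (out : String × List (List Int)) : Decidable (Spec_dict_to_str_and_map pdf_dict out) := by unfold Spec_dict_to_str_and_map; infer_instance

-- ===== CLAIM (what is proved, stated in full; the proofs are below) =====
def Claim_equal_dict_to_str_and_map : Prop := ∀ (pdf_dict : List (Int × List String)), Dom_dict_to_str_and_map pdf_dict → Pre_dict_to_str_and_map pdf_dict → Spec_dict_to_str_and_map pdf_dict (dict_to_str_and_map pdf_dict)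

-- ===== LEMMAS AND PROOFS =====

-- joined string of one page
def pvJoin1 (p : Int × List String) : String := PySem.Str.join "" p.2

-- the char-offset map built with running offset c (proof-side closed form)
def pvPMap : List (Int × List String) → Int → List (List Int)
  | [], _ => []
  | (k, v) :: t, c => [c, k + 1] :: pvPMap t (c + PySem.Str.len (PySem.Str.join "" v))

-- the tail of the offsets list, starting after base offset c
def pvOffs : List (Int × List String) → Int → List Int
  | [], _ => []
  | (_, v) :: t, c =>
      (c + PySem.Str.len (PySem.Str.join "" v)) :: pvOffs t (c + PySem.Str.len (PySem.Str.join "" v))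

theorem pyGet?_cons_neg_one (x : Int) (xs : List Int) :
    PySem.List.pyGet? (x :: xs) (-1) = some ((x :: xs).getLast (by simp)) := by
  simp only [PySem.List.pyGet?, PySem.List.pyIdx?]
  norm_num
  simp only [List.getLast_eq_getElem, List.length_cons, Nat.add_sub_cancel]
  rfl

theorem pyGet?_append_singleton_neg_one (xs : List Int) (x : Int) :
    PySem.List.pyGet? (xs ++ [x]) (-1) = some x := by
  cases xs with
  | nil => simp [PySem.List.pyGet?, PySem.List.pyIdx?]
  | cons a as =>
      rw [List.cons_append, pyGet?_cons_neg_one]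
      simp [List.getLast_eq_getElem, List.getElem_append_right]

theorem str_join_empty_cons (s : String) (t : List String) :
    PySem.Str.join "" (s :: t) = s ++ PySem.Str.join "" t := by
  simp only [PySem.Str.join, List.map_cons]
  rw [show ("".toList) = ([] : List Char) from rfl]
  cases t with
  | nil => simp [PySem.Chars.join_singleton, PySem.Chars.join_nil]
  | cons u rest =>
      simp only [List.map_cons]
      rw [PySem.Chars.join_cons_cons]
      simp [String.ofList_append]

-- A's loop over the (key, pages) pairs computes the joined string and pvPMap
theorem A_fold (l : List (Int × List String)) (s0 : String) (m0 : List (List Int)) :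
    l.foldl
      (fun (st : String × List (List Int)) p =>
        (st.1 ++ PySem.Str.join "" p.2, st.2 ++ [[PySem.Str.len st.1, p.1 + 1]]))
      (s0, m0)
    = (s0 ++ PySem.Str.join "" (l.map pvJoin1), m0 ++ pvPMap l (PySem.Str.len s0)) := by
  induction l generalizing s0 m0 with
  | nil => simp [pvPMap, PySem.Str.join, PySem.Chars.join_nil]
  | cons p t ih =>
      obtain ⟨k, v⟩ := p
      simp only [List.foldl_cons, ih, List.map_cons, pvPMap, pvJoin1]
      rw [str_join_empty_cons, PySem.Str.len_append]
      simp [String.append_assoc]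

-- B's offsets loop appends pvOffs to any accumulator whose last element is c
theorem B_offsets (l : List (Int × List String)) (acc : List Int) (c : Int)
    (h : PySem.List.pyGet? acc (-1) = some c) :
    (l.map pvJoin1).foldl
      (fun (acc : List Int) s => acc ++ [(PySem.List.pyGet? acc (-1)).getD 0 + PySem.Str.len s]) acc
    = acc ++ pvOffs l c := by
  induction l generalizing acc c with
  | nil => simp [pvOffs]
  | cons p t ih =>
      obtain ⟨k, v⟩ := p
      simp only [List.map_cons, List.foldl_cons, h, Option.getD_some, pvOffs, pvJoin1]
      rw [ih (acc ++ [c + PySem.Str.len (PySem.Str.join "" v)]) (c + PySem.Str.len (PySem.Str.join "" v))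
            (pyGet?_append_singleton_neg_one acc _)]
      simp

theorem pvOffs_getLast (l : List (Int × List String)) (c : Int) :
    (c :: pvOffs l c).getLast (by simp) = c + PySem.Str.len (PySem.Str.join "" (l.map pvJoin1)) := by
  induction l generalizing c with
  | nil =>
      simp only [pvOffs, List.getLast_singleton, List.map_nil]
      rw [show PySem.Str.join "" [] = "" from rfl,
          show PySem.Str.len "" = (0 : Int) from by decide]
      ring
  | cons p t ih =>
      obtain ⟨k, v⟩ := p
      simp only [pvOffs, List.map_cons, pvJoin1]
      rw [List.getLast_cons (by simp), ih]
      rw [str_join_empty_cons, PySem.Str.len_append]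
      ring

theorem B_zip (l : List (Int × List String)) (c : Int) :
    ((c :: pvOffs l c).zip (l.map Prod.fst)).map (fun p => [p.1, p.2 + 1]) = pvPMap l c := by
  induction l generalizing c with
  | nil => simp [pvPMap]
  | cons p t ih =>
      obtain ⟨k, v⟩ := p
      simp only [pvOffs, List.map_cons, List.zip_cons_cons, List.map, pvPMap]
      rw [ih]

-- ===== VERDICT (by name: the statement is the Claim_ definition above) =====
theorem dict_to_str_and_map_spec : Claim_equal_dict_to_str_and_map := by
  intro pdf_dict _ hpre
  unfold Spec_dict_to_str_and_map dict_to_str_and_map dict_to_str_and_map_alt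
  simp only []
  have hkeys : (PySem.Dict.mk pdf_dict).keys = pdf_dict.map Prod.fst := rfl
  have hnd : (PySem.Dict.mk pdf_dict).keys.Nodup := by rw [hkeys]; exact hpre
  rw [hkeys, List.foldl_map]
  rw [PySem.List.foldl_congr_mem pdf_dict _
        (fun (st : String × List (List Int)) p =>
          (st.1 ++ PySem.Str.join "" p.2, st.2 ++ [[PySem.Str.len st.1, p.1 + 1]]))
        ("", [])
        (by
          intro acc p hp
          obtain ⟨k, v⟩ := p
          have : (PySem.Dict.mk pdf_dict).getD k [] = v :=
            PySem.Dict.getD_of_mem_items (PySem.Dict.mk pdf_dict) hp hnd []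
          simp [this])]
  rw [A_fold]
  rw [show (fun p : Int × List String => PySem.Str.join "" p.2) = pvJoin1 from rfl]
  rw [B_offsets (acc := [0]) (c := 0) (h := by decide)]
  rw [show ([0] ++ pvOffs pdf_dict 0 : List Int) = 0 :: pvOffs pdf_dict 0 from rfl]
  rw [B_zip, pyGet?_cons_neg_one, pvOffs_getLast]
  simp only [Option.getD_some]
  have hlen0 : PySem.Str.len "" = 0 := by decide
  simp [PySem.Dict.size, String.empty_append]
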